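-- pv_equiv track=rewrite | github.com/symlabs-ai/symforge_processes | forgeprocess/process/symbiotes/mdd_publisher/scripts/utils/template_engine.py | extract_from_markdown
-- ===== SOURCE A (Python) =====
-- def extract_from_markdown(md_content: str) -> dict[str, str]:
--     """
--     Extrai variáveis automaticamente do Markdown baseado em padrões.
--
--     Regras:
--     - Primeiro # h1 vira 'titulo_principal'
--     - Primeira linha de texto vira 'subtitulo'
--     - Seções ## viram variáveis lowercase
--
--     Args:
--         md_content: Conteúdo Markdown
--
--     Returns:
--         Dicionário de variáveis inferidas
--     """
--     variables: dict[str, str] = {}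
--     lines = md_content.split('\n')
--
--     # Extrai título principal (primeiro H1)
--     for line in lines:
--         if line.startswith('# ') and 'titulo_principal' not in variables:
--             variables['titulo_principal'] = line[2:].strip()
--             break
--
--     # Extrai seções (H2+)
--     current_section = None
--     section_content = []
--
--     for line in lines:
--         if line.startswith('## '):
--             if current_section and section_content:
--                 # Salva seção anterior
--                 section_key = current_section.lower().replace(' ', '_')
--                 variables[section_key] = ' '.join(section_content).strip()
--             current_section = line[3:].strip()
--             section_content = []
--         elif current_section and line.strip() and not line.startswith('#'):
--             section_content.append(line.strip())
--
--     # Salva última seção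
--     if current_section and section_content:
--         section_key = current_section.lower().replace(' ', '_')
--         variables[section_key] = ' '.join(section_content).strip()
--
--     return variables
-- ===== SOURCE B (Python) =====
-- def extract_from_markdown(md_content: str) -> dict[str, str]:
--     lines = md_content.split('\n')
--     variables: dict[str, str] = {}
--     for line in lines:
--         if line.startswith('# '):
--             variables['titulo_principal'] = line[2:].strip()
--             break
--     # segment-based extraction: jump from H2 header to H2 header; for each header,
--     # locate the next header and derive the section body from that slice in one shot
--     i, n = 0, len(lines)
--     while i < n:
--         if not lines[i].startswith('## '):
--             i += 1
--             continue
--         header = lines[i][3:].strip()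
--         j = i + 1
--         while j < n and not lines[j].startswith('## '):
--             j += 1
--         body = [l.strip() for l in lines[i + 1:j] if l.strip() and not l.startswith('#')]
--         if header and body:
--             variables[header.lower().replace(' ', '_')] = ' '.join(body).strip()
--         i = j
--     return variables
-- ===== Notes on version B (the rewrite author's own statement) =====
-- stated objective: alternative
-- what changed: B replaces A's single stateful scan (current_section/section_content accumulators flushed on the fly) with segment extraction: it jumps from H2 header to the next H2 header with an index pointer, derives each section body from the slice between them by one comprehension, and emits the variable immediately; no cross-line accumulator state is carried.
import Mathlib
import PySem

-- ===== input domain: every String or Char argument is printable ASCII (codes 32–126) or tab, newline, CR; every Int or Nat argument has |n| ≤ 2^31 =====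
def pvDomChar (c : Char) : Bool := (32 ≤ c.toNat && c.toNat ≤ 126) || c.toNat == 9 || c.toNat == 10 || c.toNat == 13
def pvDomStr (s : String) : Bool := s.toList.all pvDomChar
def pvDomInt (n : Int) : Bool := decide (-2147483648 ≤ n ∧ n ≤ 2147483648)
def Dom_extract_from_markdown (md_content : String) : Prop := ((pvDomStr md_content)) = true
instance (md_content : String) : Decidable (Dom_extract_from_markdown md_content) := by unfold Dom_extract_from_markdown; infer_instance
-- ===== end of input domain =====

-- B replaces A's stateful scan with header-to-header segment extraction (each section body
-- derived from the slice between consecutive H2 headers); objective: alternative decomposition.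

-- small expressions both Pythons contain verbatim
def pvKey (h : String) : String := PySem.Str.replace (PySem.Str.lower h) " " "_"
def pvJoinStrip (sc : List String) : String := PySem.Str.strip (PySem.Str.join " " sc)

-- ===== PORT A =====
-- A's section-scan loop body: state = (variables, current_section, section_content)
def pvStepA (st : PySem.Dict String String × Option String × List String) (line : String) :
    PySem.Dict String String × Option String × List String :=
  match st with
  | (vars, cs, sc) =>
    if PySem.Str.startswith line "## " then
      let vars' := if (cs.getD "" != "") && !sc.isEmpty then
          vars.insert (pvKey (cs.getD "")) (pvJoinStrip sc)
        else vars
      (vars', some (PySem.Str.strip (PySem.Str.slice line (some 3) none)), [])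
    else if (cs.getD "" != "") && (PySem.Str.strip line != "") && !(PySem.Str.startswith line "#") then
      (vars, cs, sc ++ [PySem.Str.strip line])
    else (vars, cs, sc)

-- A's trailing "save last section"
def pvFinA (st : PySem.Dict String String × Option String × List String) : PySem.Dict String String :=
  match st with
  | (vars, cs, sc) =>
    if (cs.getD "" != "") && !sc.isEmpty then vars.insert (pvKey (cs.getD "")) (pvJoinStrip sc)
    else vars

def extract_from_markdown (md_content : String) : List (String × String) :=
  let lines := (PySem.Str.split? md_content "\n").getD []
  -- title loop: the first H1 is inserted and the loop breaks (dict still empty, so the 'not in' test holds)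
  let vars0 : PySem.Dict String String :=
    match lines.find? (fun l => PySem.Str.startswith l "# ") with
    | some l => (PySem.Dict.empty).insert "titulo_principal" (PySem.Str.strip (PySem.Str.slice l (some 2) none))
    | none => PySem.Dict.empty
  (pvFinA (lines.foldl pvStepA (vars0, none, []))).items

-- ===== PORT B =====
-- the body comprehension: [l.strip() for l in <span up to next '## '> if l.strip() and not l.startswith('#')]
def pvBody (ls : List String) : List String :=
  ((ls.takeWhile (fun x => !(PySem.Str.startswith x "## "))).filter
    (fun x => (PySem.Str.strip x != "") && !(PySem.Str.startswith x "#"))).map PySem.Str.strip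

-- B's outer while loop: skip to the next H2 header, take the span up to the following
-- header as its body (the inner j-scan + slice), emit the variable, continue at j
def pvSections (vars : PySem.Dict String String) (rest : List String) : PySem.Dict String String :=
  match rest with
  | [] => vars
  | l :: ls =>
    if PySem.Str.startswith l "## " then
      let header := PySem.Str.strip (PySem.Str.slice l (some 3) none)
      let content := pvBody ls
      let vars' := if (header != "") && !content.isEmpty then
          vars.insert (pvKey header) (pvJoinStrip content) else vars
      pvSections vars' (ls.dropWhile (fun x => !(PySem.Str.startswith x "## ")))
    else pvSections vars ls
termination_by rest.length
decreasing_by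
  · exact Nat.lt_succ_of_le (List.length_dropWhile_le _ _)
  · simp

def extract_from_markdown_alt (md_content : String) : List (String × String) :=
  let lines := (PySem.Str.split? md_content "\n").getD []
  let vars0 : PySem.Dict String String :=
    match lines.find? (fun l => PySem.Str.startswith l "# ") with
    | some l => (PySem.Dict.empty).insert "titulo_principal" (PySem.Str.strip (PySem.Str.slice l (some 2) none))
    | none => PySem.Dict.empty
  (pvSections vars0 lines).items

-- ===== PRECONDITION & SPEC =====
def Spec_extract_from_markdown (md_content : String) (out : List (String × String)) : Prop := out = extract_from_markdown_alt md_content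
instance (md_content : String) (out : List (String × String)) : Decidable (Spec_extract_from_markdown md_content out) := by unfold Spec_extract_from_markdown; infer_instance

-- ===== CLAIM (what is proved, stated in full; the proofs are below) =====
def Claim_equal_extract_from_markdown : Prop := ∀ (md_content : String), Dom_extract_from_markdown md_content → Spec_extract_from_markdown md_content (extract_from_markdown md_content)

-- ===== LEMMAS AND PROOFS =====

-- the flush both programs perform when a section ends
def pvFlushT (vars : PySem.Dict String String) (t : String) (c : List String) : PySem.Dict String String :=
  if (t != "") && !c.isEmpty then vars.insert (pvKey t) (pvJoinStrip c) else vars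

-- unfolding equation for the WF-recursive pvSections
lemma pvSections_cons (vars : PySem.Dict String String) (l : String) (ls : List String) :
    pvSections vars (l :: ls) =
    if PySem.Str.startswith l "## " then
      pvSections
        (if (PySem.Str.strip (PySem.Str.slice l (some 3) none) != "") && !(pvBody ls).isEmpty then
          vars.insert (pvKey (PySem.Str.strip (PySem.Str.slice l (some 3) none))) (pvJoinStrip (pvBody ls))
        else vars)
        (ls.dropWhile (fun x => !(PySem.Str.startswith x "## ")))
    else pvSections vars ls := by
  rw [pvSections]

-- A's scan from an open section t with already-collected sc equals B's segment treatment
lemma pvL2 (ls : List String) (vars : PySem.Dict String String) (t : String) (sc : List String) :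
    pvFinA (ls.foldl pvStepA (vars, some t, sc)) =
    pvSections (pvFlushT vars t (sc ++ pvBody ls))
      (ls.dropWhile (fun x => !(PySem.Str.startswith x "## "))) := by
  induction ls generalizing vars sc t with
  | nil => simp [pvFinA, pvFlushT, pvBody, pvSections]
  | cons l ls ih =>
    by_cases hH : PySem.Chars.startswith l.toList ['#', '#', ' '] = true
    · rw [List.foldl_cons,
        show pvStepA (vars, some t, sc) l =
          (pvFlushT vars t sc, some (PySem.Str.strip (PySem.Str.slice l (some 3) none)), []) by
            simp [pvStepA, pvFlushT, hH],
        ih]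
      have hb : pvBody (l :: ls) = [] := by simp [pvBody, List.takeWhile, hH]
      have hd : (l :: ls).dropWhile (fun x => !(PySem.Str.startswith x "## ")) = l :: ls := by
        simp [List.dropWhile, hH]
      rw [hb, hd, List.append_nil, pvSections_cons]
      simp [hH, pvFlushT]
    · by_cases hC : (PySem.Str.strip l != "" && !(PySem.Chars.startswith l.toList ['#'])) = true
      · obtain ⟨hS, hP⟩ := by simpa using hC
        by_cases hT : t = ""
        · subst hT
          rw [List.foldl_cons,
            show pvStepA (vars, some "", sc) l = (vars, some "", sc) by simp [pvStepA, hH], ih]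
          simp [pvFlushT, pvBody, List.takeWhile, List.dropWhile, hH, hS, hP]
        · rw [List.foldl_cons,
            show pvStepA (vars, some t, sc) l = (vars, some t, sc ++ [PySem.Str.strip l]) by
              simp [pvStepA, hH, hS, hP, hT], ih]
          have hb : pvBody (l :: ls) = PySem.Str.strip l :: pvBody ls := by
            simp [pvBody, List.takeWhile, hH, hS, hP]
          rw [hb, List.append_assoc]
          simp [List.dropWhile, hH]
      · have hC' : PySem.Str.strip l = "" ∨ PySem.Chars.startswith l.toList ['#'] = true := by
          rcases Bool.and_eq_false_iff.mp (eq_false_of_ne_true hC) with h | h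
          · exact Or.inl (by simpa using h)
          · exact Or.inr (by simpa using h)
        rw [List.foldl_cons,
          show pvStepA (vars, some t, sc) l = (vars, some t, sc) by
            rcases hC' with h | h <;> simp [pvStepA, hH, h], ih]
        have hb : pvBody (l :: ls) = pvBody ls := by
          rcases hC' with h | h <;> simp [pvBody, List.takeWhile, hH, h]
        rw [hb]
        simp [List.dropWhile, hH]

-- before the first header, A carries no section and B skips lines
lemma pvL1 (ls : List String) (vars : PySem.Dict String String) :
    pvFinA (ls.foldl pvStepA (vars, none, [])) = pvSections vars ls := by
  induction ls generalizing vars with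
  | nil => simp [pvFinA, pvSections]
  | cons l ls ih =>
    by_cases hH : PySem.Chars.startswith l.toList ['#', '#', ' '] = true
    · rw [List.foldl_cons,
        show pvStepA (vars, none, []) l =
          (vars, some (PySem.Str.strip (PySem.Str.slice l (some 3) none)), []) by
            simp [pvStepA, hH],
        pvL2]
      conv_rhs => rw [pvSections_cons]
      simp [hH, pvFlushT]
    · rw [List.foldl_cons,
        show pvStepA (vars, none, []) l = (vars, none, []) by simp [pvStepA, hH], ih]
      conv_rhs => rw [pvSections_cons]
      simp [hH]

-- ===== VERDICT (by name: the statement is the Claim_ definition above) =====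
theorem extract_from_markdown_spec : Claim_equal_extract_from_markdown := by
  intro md _
  unfold Spec_extract_from_markdown extract_from_markdown extract_from_markdown_alt
  cases hf : ((PySem.Str.split? md "\n").getD []).find? (fun l => PySem.Str.startswith l "# ") <;>
    simp only [hf] <;> exact congrArg PySem.Dict.items (pvL1 _ _)
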